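-- pv_equiv track=rewrite | github.com/jmederosalvarado/daa-project | icpc-finals/fibonacci-words/fibonacci.py | fibonacci_words
-- ===== SOURCE A (Python) =====
-- def compute_prefix_func(pattern):
--     prefix_func = [0]
--
--     for i in range(1, len(pattern)):
--         j = prefix_func[i - 1]
--         while j > 0 and pattern[j] != pattern[i]:
--             j = prefix_func[j - 1]
--         if pattern[j] == pattern[i]:
--             prefix_func.append(j+1)
--         else:
--             prefix_func.append(j)
--
--     return prefix_func
--
-- def kmp(text, pattern):
--     prefix_func = compute_prefix_func(pattern)
--     matches, j = 0, 0
--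
--     for i in range(len(text)):
--         while j > 0 and text[i] != pattern[j]:
--             j = prefix_func[j - 1]
--         if text[i] == pattern[j]:
--             j += 1
--         if j == len(pattern):
--             matches += 1
--             j = prefix_func[j - 1]
--
--     return matches
--
-- def fibonacci_words(n, p):
--     dp = [0]*(n+2)
--
--     dp[0] = 1 if p == '0' else 0
--     dp[1] = 1 if p == '1' else 0
--
--     prefix = ['0', '1']
--     suffix = ['0', '1']
--
--     m = len(p) - 1
--
--     for i in range(2, n+1):
--         center = kmp(suffix[i-1][-m:] + prefix[i-2][:m], p) if m > 0 else 0
--         dp[i] = dp[i-1] + dp[i-2] + center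
--
--         if len(prefix[i-1]) >= len(p) - 1:
--             prefix.append(prefix[i-1])
--         else:
--             prefix.append(prefix[i-1] + prefix[i-2])
--
--         if len(suffix[i-2]) >= len(p) - 1:
--             suffix.append(suffix[i-2])
--         else:
--             suffix.append(suffix[i-1] + suffix[i-2])
--
--     return dp[n]
-- ===== SOURCE B (Python) =====
-- def compute_prefix_func(pattern):
--     prefix_func = [0]
--     for i in range(1, len(pattern)):
--         j = prefix_func[i - 1]
--         while j > 0 and pattern[j] != pattern[i]:
--             j = prefix_func[j - 1]
--         if pattern[j] == pattern[i]:
--             prefix_func.append(j + 1)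
--         else:
--             prefix_func.append(j)
--     return prefix_func
--
-- def kmp(text, pattern):
--     prefix_func = compute_prefix_func(pattern)
--     matches, j = 0, 0
--     for i in range(len(text)):
--         while j > 0 and text[i] != pattern[j]:
--             j = prefix_func[j - 1]
--         if text[i] == pattern[j]:
--             j += 1
--         if j == len(pattern):
--             matches += 1
--             j = prefix_func[j - 1]
--     return matches
--
-- def fibonacci_words(n, p):
--     # dp follows dp[i] = dp[i-1] + dp[i-2] + center(i); the prefix/suffix context
--     # strings stabilise after O(log len(p)) steps, after which center(i) only
--     # alternates between two constants, so KMP is run only during the short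
--     # unstable phase (and twice after it) instead of once per iteration.
--     a = 1 if p == '0' else 0
--     b = 1 if p == '1' else 0
--     if n <= 0:
--         return a
--     if n == 1:
--         return b
--     m = len(p) - 1
--     pre2, pre1 = '0', '1'
--     suf2, suf1 = '0', '1'
--     i = 2
--     while i <= n and not (pre2 == pre1 and len(pre1) >= m
--                           and len(suf1) >= m and len(suf2) >= m):
--         center = kmp(suf1[-m:] + pre2[:m], p) if m > 0 else 0
--         a, b = b, a + b + center
--         pre2, pre1 = pre1, (pre1 if len(pre1) >= m else pre1 + pre2)
--         suf2, suf1 = suf1, (suf2 if len(suf2) >= m else suf1 + suf2)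
--         i += 1
--     if i > n:
--         return b
--     c1 = kmp(suf1[-m:] + pre1[:m], p) if m > 0 else 0
--     c2 = kmp(suf2[-m:] + pre1[:m], p) if m > 0 else 0
--     for _ in range(i, n + 1):
--         a, b = b, a + b + c1
--         c1, c2 = c2, c1
--     return b
-- ===== Notes on version B (the rewrite author's own statement) =====
-- stated objective: faster
-- what changed: Instead of maintaining dp/prefix/suffix lists and running a KMP match on every one of the n loop iterations, B iterates the step only until the bounded prefix/suffix context strings stabilise (O(log m) iterations), after which the KMP-computed center term provably just alternates between two constants, so the remaining n iterations are plain additions with no string work.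
import Mathlib
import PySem

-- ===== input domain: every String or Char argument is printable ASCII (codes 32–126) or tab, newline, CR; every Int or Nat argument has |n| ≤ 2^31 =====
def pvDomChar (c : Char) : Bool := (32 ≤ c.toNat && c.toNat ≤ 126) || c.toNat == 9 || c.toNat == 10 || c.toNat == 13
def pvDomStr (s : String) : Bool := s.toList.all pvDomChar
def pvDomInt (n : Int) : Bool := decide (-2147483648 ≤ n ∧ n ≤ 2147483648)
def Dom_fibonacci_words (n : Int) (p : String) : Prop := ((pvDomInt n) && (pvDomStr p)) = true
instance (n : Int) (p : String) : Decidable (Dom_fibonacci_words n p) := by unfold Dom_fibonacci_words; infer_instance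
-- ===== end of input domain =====

-- B replaces the per-iteration KMP scan by a short loop that runs only until the
-- prefix/suffix context strings stabilise, after which the added "center" term
-- merely alternates between two precomputed constants (objective: faster).


-- ===== PORT A =====
-- Shared KMP helpers (identical source code in Source A and Source B).
-- The inner `while j > 0 and c != pattern[j]: j = prefix_func[j-1]` loop: fuel = j
-- is enough, since prefix-function values satisfy pf[j-1] ≤ j-1 (j strictly
-- decreases; when fuel runs out j = 0, exactly where Python's loop stops too).
def kmpFall (pat : List Char) (pf : List Nat) (c : Char) : Nat → Nat → Nat
  | j, 0 => j
  | j, fuel + 1 =>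
    if 0 < j ∧ ¬ c = pat.getD j ' ' then kmpFall pat pf c (pf.getD (j - 1) 0) fuel else j

-- compute_prefix_func; indices are the in-range non-negative i of range(1, len(pattern))
def computePrefixFunc (pat : List Char) : List Nat :=
  (PySem.List.pyRange 1 (pat.length : Int) 1).foldl
    (fun pf i =>
      let j := pf.getD (i.toNat - 1) 0
      let j := kmpFall pat pf (pat.getD i.toNat ' ') j j
      if pat.getD j ' ' = pat.getD i.toNat ' ' then pf ++ [j + 1] else pf ++ [j])
    [0]

-- kmp; `for i in range(len(text))` reading text[i] = fold over the characters of text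
def kmpCount (text pat : List Char) : Int :=
  let pf := computePrefixFunc pat
  (text.foldl
    (fun (s : Int × Nat) c =>
      let j := kmpFall pat pf c s.2 s.2
      let j := if c = pat.getD j ' ' then j + 1 else j
      if j = pat.length then (s.1 + 1, pf.getD (j - 1) 0) else (s.1, j))
    (0, 0)).1

-- the expression `kmp(<suffix>[-m:] + <prefix>[:m], p) if m > 0 else 0` with m = len(p)-1,
-- appearing verbatim in both Source A and Source B
def centerOf (pL : List Char) (suf pre : List Char) : Int :=
  let m : Int := (pL.length : Int) - 1
  if m > 0 then
    kmpCount (PySem.List.slice suf (some (-m)) none ++ PySem.List.slice pre none (some m)) pL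
  else 0

-- fibonacci_words, the loop as a foldl over range(2, n+1) on state (dp, prefix, suffix);
-- all list indices i, i-1, i-2, n are non-negative and in range under Pre_ (0 ≤ n),
-- so plain getD/set are exact (Python would raise only for n < 0, excluded by Pre_)
def fibonacci_words (n : Int) (p : String) : Int :=
  let pL := p.toList
  let dp : List Int := List.replicate (n + 2).toNat 0
  let dp := dp.set 0 (if pL = ['0'] then 1 else 0)
  let dp := dp.set 1 (if pL = ['1'] then 1 else 0)
  let st :=
    (PySem.List.pyRange 2 (n + 1) 1).foldl
      (fun (st : List Int × List (List Char) × List (List Char)) i =>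
        let dp := st.1
        let pre := st.2.1
        let suf := st.2.2
        let center := centerOf pL (suf.getD (i - 1).toNat []) (pre.getD (i - 2).toNat [])
        let dp := dp.set i.toNat (dp.getD (i - 1).toNat 0 + dp.getD (i - 2).toNat 0 + center)
        let pre :=
          if ((pre.getD (i - 1).toNat []).length : Int) ≥ (pL.length : Int) - 1 then
            pre ++ [pre.getD (i - 1).toNat []]
          else pre ++ [pre.getD (i - 1).toNat [] ++ pre.getD (i - 2).toNat []]
        let suf :=
          if ((suf.getD (i - 2).toNat []).length : Int) ≥ (pL.length : Int) - 1 then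
            suf ++ [suf.getD (i - 2).toNat []]
          else suf ++ [suf.getD (i - 1).toNat [] ++ suf.getD (i - 2).toNat []]
        (dp, pre, suf))
      (dp, [['0'], ['1']], [['0'], ['1']])
  st.1.getD n.toNat 0

-- ===== PORT B =====
-- Source B's `while i <= n and not stabilised: …` loop; fuel = n - 1 counts the remaining
-- iterations (fuel = 0 ↔ i > n); returns (remaining fuel, final state)
def fibPhase1 (pL : List Char) :
    Nat → Int × Int × List Char × List Char × List Char × List Char →
    Nat × (Int × Int × List Char × List Char × List Char × List Char)
  | 0, st => (0, st)
  | fuel + 1, (a, b, p2, p1, s2, s1) =>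
    let m : Int := (pL.length : Int) - 1
    if p2 = p1 ∧ (p1.length : Int) ≥ m ∧ (s1.length : Int) ≥ m ∧ (s2.length : Int) ≥ m then
      (fuel + 1, (a, b, p2, p1, s2, s1))
    else
      fibPhase1 pL fuel
        (b, a + b + centerOf pL s1 p2, p1,
         if (p1.length : Int) ≥ m then p1 else p1 ++ p2, s1,
         if (s2.length : Int) ≥ m then s2 else s1 ++ s2)

-- Source B's `for _ in range(i, n+1): a, b = b, a+b+c1; c1, c2 = c2, c1` on state (a, b, c1, c2)
def fibPhase2 : Nat → Int × Int × Int × Int → Int × Int × Int × Int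
  | 0, st => st
  | r + 1, (a, b, c1, c2) => fibPhase2 r (b, a + b + c1, c2, c1)

def fibonacci_words_alt (n : Int) (p : String) : Int :=
  let pL := p.toList
  let a : Int := if pL = ['0'] then 1 else 0
  let b : Int := if pL = ['1'] then 1 else 0
  if n ≤ 0 then a
  else if n = 1 then b
  else
    let r := fibPhase1 pL (n - 1).toNat (a, b, ['0'], ['1'], ['0'], ['1'])
    let rem := r.1
    let a := r.2.1
    let b := r.2.2.1
    let p1 := r.2.2.2.2.1
    let s2 := r.2.2.2.2.2.1
    let s1 := r.2.2.2.2.2.2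
    if rem = 0 then b
    else (fibPhase2 rem (a, b, centerOf pL s1 p1, centerOf pL s2 p1)).2.1

-- ===== PRECONDITION & SPEC =====
-- Pre_ excludes exactly n < 0, where Python A raises IndexError (dp[1] / dp[0] on a
-- too-short preallocated list).
def Pre_fibonacci_words (n : Int) (p : String) : Prop := 0 ≤ n
instance (n : Int) (p : String) : Decidable (Pre_fibonacci_words n p) := by
  unfold Pre_fibonacci_words; infer_instance

def pvWitness_fibonacci_words : Int × String := (3, "01")

def Spec_fibonacci_words (n : Int) (p : String) (out : Int) : Prop := out = fibonacci_words_alt n p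
instance (n : Int) (p : String) (out : Int) : Decidable (Spec_fibonacci_words n p out) := by
  unfold Spec_fibonacci_words; infer_instance

-- ===== CLAIM (what is proved, stated in full; the proofs are below) =====
def Claim_equal_fibonacci_words : Prop :=
  ∀ (n : Int) (p : String), Dom_fibonacci_words n p → Pre_fibonacci_words n p →
    Spec_fibonacci_words n p (fibonacci_words n p)

-- ===== LEMMAS AND PROOFS =====

-- the common one-step transition on the 6-tuple (dp[i-2], dp[i-1], prefix[i-2],
-- prefix[i-1], suffix[i-2], suffix[i-1])
def fibStepT (pL : List Char) (st : Int × Int × List Char × List Char × List Char × List Char) :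
    Int × Int × List Char × List Char × List Char × List Char :=
  match st with
  | (a, b, p2, p1, s2, s1) =>
    let m : Int := (pL.length : Int) - 1
    (b, a + b + centerOf pL s1 p2, p1,
     if (p1.length : Int) ≥ m then p1 else p1 ++ p2, s1,
     if (s2.length : Int) ≥ m then s2 else s1 ++ s2)

-- the stabilisation condition checked by fibPhase1
def fibStab (pL : List Char) (st : Int × Int × List Char × List Char × List Char × List Char) :
    Prop :=
  st.2.2.1 = st.2.2.2.1 ∧ ((pL.length : Int) - 1) ≤ (st.2.2.2.1.length : Int) ∧
    ((pL.length : Int) - 1) ≤ (st.2.2.2.2.2.length : Int) ∧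
    ((pL.length : Int) - 1) ≤ (st.2.2.2.2.1.length : Int)

-- phase 1 performs fuel - rem steps of fibStepT and stops only when out of fuel
-- or on a stabilised state
theorem fibPhase1_spec (pL : List Char) : ∀ (fuel : Nat)
    (st : Int × Int × List Char × List Char × List Char × List Char),
    (fibPhase1 pL fuel st).1 ≤ fuel ∧
    (fibPhase1 pL fuel st).2 = (fibStepT pL)^[fuel - (fibPhase1 pL fuel st).1] st ∧
    (0 < (fibPhase1 pL fuel st).1 → fibStab pL (fibPhase1 pL fuel st).2) := by
  intro fuel
  induction fuel with
  | zero => intro st; simp [fibPhase1]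
  | succ f ih =>
    rintro ⟨a, b, p2, p1, s2, s1⟩
    rw [fibPhase1]
    by_cases h : p2 = p1 ∧ (p1.length : Int) ≥ (pL.length : Int) - 1 ∧
        (s1.length : Int) ≥ (pL.length : Int) - 1 ∧ (s2.length : Int) ≥ (pL.length : Int) - 1
    · rw [if_pos h]
      refine ⟨le_refl _, by simp, fun _ => ?_⟩
      simpa [fibStab, ge_iff_le] using h
    · rw [if_neg h]
      have hstep : (fibStepT pL) (a, b, p2, p1, s2, s1) =
          (b, a + b + centerOf pL s1 p2, p1,
           if (p1.length : Int) ≥ (pL.length : Int) - 1 then p1 else p1 ++ p2, s1,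
           if (s2.length : Int) ≥ (pL.length : Int) - 1 then s2 else s1 ++ s2) := rfl
      rw [← hstep]
      obtain ⟨h1, h2, h3⟩ := ih (fibStepT pL (a, b, p2, p1, s2, s1))
      refine ⟨h1.trans (Nat.le_succ f), ?_, h3⟩
      rw [h2, ← Function.iterate_succ_apply]
      congr 1
      omega
-- on a stabilised state one fibStepT step just adds the center constant and
-- swaps the two suffix strings
theorem fibStepT_stab (pL : List Char) (a b : Int) (p1 s2 s1 : List Char)
    (hp : (pL.length : Int) - 1 ≤ (p1.length : Int))
    (hs2 : (pL.length : Int) - 1 ≤ (s2.length : Int)) :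
    fibStepT pL (a, b, p1, p1, s2, s1) = (b, a + b + centerOf pL s1 p1, p1, p1, s1, s2) := by
  simp [fibStepT, ge_iff_le, hp, hs2]

-- phase 2 computes the remaining fibStepT iterations
theorem fibPhase2_spec (pL : List Char) : ∀ (r : Nat) (a b : Int) (p1 s2 s1 : List Char),
    (pL.length : Int) - 1 ≤ (p1.length : Int) →
    (pL.length : Int) - 1 ≤ (s2.length : Int) →
    (pL.length : Int) - 1 ≤ (s1.length : Int) →
    ((fibStepT pL)^[r] (a, b, p1, p1, s2, s1)).2.1 =
      (fibPhase2 r (a, b, centerOf pL s1 p1, centerOf pL s2 p1)).2.1 := by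
  intro r
  induction r with
  | zero => intro a b p1 s2 s1 _ _ _; simp [fibPhase2]
  | succ r ih =>
    intro a b p1 s2 s1 hp hs2 hs1
    rw [Function.iterate_succ_apply, fibStepT_stab pL a b p1 s2 s1 hp hs2, fibPhase2]
    exact ih b (a + b + centerOf pL s1 p1) p1 s1 s2 hp hs1 hs2

-- B computes the b-component of the (n-1)-fold iterate of fibStepT
theorem fib_B_eq (n : Int) (p : String) (hn : 2 ≤ n) :
    fibonacci_words_alt n p =
      ((fibStepT p.toList)^[(n - 1).toNat]
        ((if p.toList = ['0'] then 1 else 0), (if p.toList = ['1'] then 1 else 0),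
         ['0'], ['1'], ['0'], ['1'])).2.1 := by
  have h0 : ¬ n ≤ 0 := by omega
  have h1 : ¬ n = 1 := by omega
  obtain ⟨hle, heq, hstab⟩ := fibPhase1_spec p.toList (n - 1).toNat
    ((if p.toList = ['0'] then 1 else 0), (if p.toList = ['1'] then 1 else 0),
     ['0'], ['1'], ['0'], ['1'])
  rcases hE : fibPhase1 p.toList (n - 1).toNat
      ((if p.toList = ['0'] then 1 else 0), (if p.toList = ['1'] then 1 else 0),
       ['0'], ['1'], ['0'], ['1']) with ⟨rem, a', b', p2', p1', s2', s1'⟩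
  rw [hE] at hle heq hstab
  simp only [fibonacci_words_alt, h0, h1, if_false, hE]
  by_cases hrem : rem = 0
  · rw [if_pos hrem]
    subst hrem
    rw [Nat.sub_zero] at heq
    exact congrArg (fun t => t.2.1) heq
  · rw [if_neg hrem]
    obtain ⟨hp2, hp, hs1, hs2⟩ := hstab (Nat.pos_of_ne_zero hrem)
    simp only at hp2 hp hs1 hs2
    subst hp2
    rw [← fibPhase2_spec p.toList rem a' b' p2' s2' s1' hp hs2 hs1]
    simp only at heq
    rw [heq]
    have hsum : rem + ((n - 1).toNat - rem) = (n - 1).toNat := by omega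
    rw [← Function.iterate_add_apply, hsum]

-- proof-side names for A's initial dp list, its loop body and the 6-tuple initial state
def fibDp0 (n : Int) (pL : List Char) : List Int :=
  ((List.replicate (n + 2).toNat 0).set 0 (if pL = ['0'] then 1 else 0)).set 1
    (if pL = ['1'] then 1 else 0)

def fibInit (pL : List Char) : Int × Int × List Char × List Char × List Char × List Char :=
  ((if pL = ['0'] then 1 else 0), (if pL = ['1'] then 1 else 0), ['0'], ['1'], ['0'], ['1'])

def fibA_F (pL : List Char) (st : List Int × List (List Char) × List (List Char)) (i : Int) :
    List Int × List (List Char) × List (List Char) :=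
  let dp := st.1
  let pre := st.2.1
  let suf := st.2.2
  let center := centerOf pL (suf.getD (i - 1).toNat []) (pre.getD (i - 2).toNat [])
  let dp := dp.set i.toNat (dp.getD (i - 1).toNat 0 + dp.getD (i - 2).toNat 0 + center)
  let pre :=
    if ((pre.getD (i - 1).toNat []).length : Int) ≥ (pL.length : Int) - 1 then
      pre ++ [pre.getD (i - 1).toNat []]
    else pre ++ [pre.getD (i - 1).toNat [] ++ pre.getD (i - 2).toNat []]
  let suf :=
    if ((suf.getD (i - 2).toNat []).length : Int) ≥ (pL.length : Int) - 1 then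
      suf ++ [suf.getD (i - 2).toNat []]
    else suf ++ [suf.getD (i - 1).toNat [] ++ suf.getD (i - 2).toNat []]
  (dp, pre, suf)

theorem fibonacci_words_eq_foldl (n : Int) (p : String) :
    fibonacci_words n p =
      ((PySem.List.pyRange 2 (n + 1) 1).foldl (fibA_F p.toList)
        (fibDp0 n p.toList, [['0'], ['1']], [['0'], ['1']])).1.getD n.toNat 0 := rfl

-- loop invariant of A: after k iterations the dp/prefix/suffix lists carry, at the
-- two topmost filled positions, exactly the components of the k-fold fibStepT iterate
theorem fibA_inv (pL : List Char) (n : Int) (hn : 1 ≤ n) : ∀ (k : Nat), (k : Int) ≤ n - 1 →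
    ∃ dpL preL sufL,
      (PySem.List.pyRange 2 (2 + (k : Int)) 1).foldl (fibA_F pL)
          (fibDp0 n pL, [['0'], ['1']], [['0'], ['1']]) = (dpL, preL, sufL) ∧
      dpL.length = (n + 2).toNat ∧
      dpL.getD (k + 1) 0 = ((fibStepT pL)^[k] (fibInit pL)).2.1 ∧
      dpL.getD k 0 = ((fibStepT pL)^[k] (fibInit pL)).1 ∧
      preL.length = k + 2 ∧
      preL.getD (k + 1) [] = ((fibStepT pL)^[k] (fibInit pL)).2.2.2.1 ∧
      preL.getD k [] = ((fibStepT pL)^[k] (fibInit pL)).2.2.1 ∧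
      sufL.length = k + 2 ∧
      sufL.getD (k + 1) [] = ((fibStepT pL)^[k] (fibInit pL)).2.2.2.2.2 ∧
      sufL.getD k [] = ((fibStepT pL)^[k] (fibInit pL)).2.2.2.2.1 := by
  intro k
  induction k with
  | zero =>
    intro _
    refine ⟨fibDp0 n pL, [['0'], ['1']], [['0'], ['1']], ?_, ?_, ?_, ?_, ?_, ?_, ?_, ?_, ?_, ?_⟩
    · norm_num [PySem.List.pyRange_one_eq_nil]
    · simp [fibDp0]
    · have h3 : (1 : Int) < n + 2 := by omega
      simp [fibDp0, fibInit, List.getD, h3]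
    · have h3 : (0 : Int) < n + 2 := by omega
      simp [fibDp0, fibInit, List.getD, h3]
    · rfl
    · rfl
    · rfl
    · rfl
    · rfl
    · rfl
  | succ k ih =>
    intro hk1
    obtain ⟨dpL, preL, sufL, hfold, hlen, hb, ha, hplen, hp1, hp2, hslen, hs1, hs2⟩ :=
      ih (by push_cast at hk1 ⊢; omega)
    have hsplit : PySem.List.pyRange 2 (2 + ((k + 1 : Nat) : Int)) 1 =
        PySem.List.pyRange 2 (2 + (k : Int)) 1 ++ [2 + (k : Int)] := by
      have := PySem.List.pyRange_one_succ_right (a := 2) (b := 2 + (k : Int)) (by omega)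
      have hc : (2 : Int) + ((k + 1 : Nat) : Int) = 2 + (k : Int) + 1 := by push_cast; ring
      rw [hc, this]
    rw [hsplit, List.foldl_append, hfold]
    rcases ht : (fibStepT pL)^[k] (fibInit pL) with ⟨ta, tb, tp2, tp1, ts2, ts1⟩
    rw [ht] at hb ha hp1 hp2 hs1 hs2
    simp only at hb ha hp1 hp2 hs1 hs2
    have e1 : ((2 : Int) + (k : Int) - 1).toNat = k + 1 := by omega
    have e2 : ((2 : Int) + (k : Int) - 2).toNat = k := by omega
    have e3 : ((2 : Int) + (k : Int)).toNat = k + 2 := by omega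
    have hkdp : k + 2 < dpL.length := by omega
    have hF : List.foldl (fibA_F pL) (dpL, preL, sufL) [2 + (k : Int)] =
        (dpL.set (k + 2) (tb + ta + centerOf pL ts1 tp2),
         preL ++ [if (tp1.length : Int) ≥ (pL.length : Int) - 1 then tp1 else tp1 ++ tp2],
         sufL ++ [if (ts2.length : Int) ≥ (pL.length : Int) - 1 then ts2 else ts1 ++ ts2]) := by
      simp only [List.foldl, fibA_F, e1, e2, e3, hb, ha, hp1, hp2, hs1, hs2]
      split_ifs <;> rfl
    have hT : (fibStepT pL)^[k + 1] (fibInit pL) =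
        (tb, ta + tb + centerOf pL ts1 tp2, tp1,
         if (tp1.length : Int) ≥ (pL.length : Int) - 1 then tp1 else tp1 ++ tp2, ts1,
         if (ts2.length : Int) ≥ (pL.length : Int) - 1 then ts2 else ts1 ++ ts2) := by
      rw [Function.iterate_succ_apply', ht]; rfl
    have hne : (k + 1 : Nat) ≠ k + 2 := by omega
    have hplt : k + 1 < preL.length := by omega
    have hslt : k + 1 < sufL.length := by omega
    refine ⟨_, _, _, hF, ?_, ?_, ?_, ?_, ?_, ?_, ?_, ?_, ?_⟩
    · simp [hlen]
    · rw [hT]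
      simp [List.getD, hkdp]
      ring
    · rw [hT]
      simpa [List.getD, hne] using hb
    · simp [hplen]
    · rw [hT]
      rw [← hplen]
      simp [List.getD]
    · rw [hT]
      rw [List.getD_append _ _ _ _ hplt, hp1]
    · simp [hslen]
    · rw [hT]
      rw [← hslen]
      simp [List.getD]
    · rw [hT]
      rw [List.getD_append _ _ _ _ hslt, hs1]
-- ===== VERDICT (by name: the statement is the Claim_ definition above) =====
theorem fibonacci_words_spec : Claim_equal_fibonacci_words := by
  intro n p _ hpre
  have hn : 0 ≤ n := hpre
  unfold Spec_fibonacci_words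
  by_cases h0 : n = 0
  · subst h0
    rw [fibonacci_words_eq_foldl]
    rw [PySem.List.pyRange_one_eq_nil (by omega)]
    simp [fibonacci_words_alt, fibDp0, List.getD]
  by_cases h1 : n = 1
  · subst h1
    rw [fibonacci_words_eq_foldl]
    rw [PySem.List.pyRange_one_eq_nil (by omega)]
    simp [fibonacci_words_alt, fibDp0, List.getD]
  have hn2 : 2 ≤ n := by omega
  rw [fib_B_eq n p hn2, fibonacci_words_eq_foldl]
  obtain ⟨dpL, preL, sufL, hfold, hlen, hbv, hav, hplen, hp1, hp2, hslen, hs1, hs2⟩ :=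
    fibA_inv p.toList n (by omega) (n - 1).toNat (by omega)
  rw [show (n + 1 : Int) = 2 + (((n - 1).toNat : Nat) : Int) from by omega, hfold]
  simp only [fibInit] at hbv
  have hnk : n.toNat = (n - 1).toNat + 1 := by omega
  show dpL.getD n.toNat 0 = _
  rw [hnk, hbv]
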